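-- pv_equiv track=rewrite | github.com/Nelinger91/Projects | Chords and lyrics/tag_all_words.py | tag_all_words
-- ===== SOURCE A (Python) =====
-- from itertools import repeat
--
-- def get_chord_per_word(words_sent, chords_sent):
--     num_words = len(words_sent)
--     num_chords = len(chords_sent)
--
--     if num_words > num_chords:
--         chord_per_word_list = []
--         repeat_chord_n_times = num_words // num_chords  # floor
--
--         for chord in chords_sent:
--             chord_per_word_list.extend(repeat(chord, repeat_chord_n_times))
--         while len(chord_per_word_list) != len(words_sent):
--             chord_per_word_list.append(chord_per_word_list[-1])  # add last chord until same length
--         return zip(words_sent, chord_per_word_list)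
--
--     else:  # num_words <= num_chords
--         return zip(words_sent, chords_sent)
--
-- def tag_all_words(data):
--     corpus = []
--     for artist_key, artist_val in data.items():
--         for song_key, song_val in artist_val.items():
--             chords = song_val[0]
--             lyrics = song_val[1]
--             if len(chords) == len(lyrics):
--                 zipped = zip(lyrics, chords)
--                 for words_sent, chords_sent in zipped:
--                     words_sent = words_sent.split()
--                     chords_sent = chords_sent.split()
--                     chord_per_word_list = get_chord_per_word(words_sent, chords_sent)
--                     corpus.extend(chord_per_word_list)
--     return corpus
-- ===== SOURCE B (Python) =====
-- def tag_all_words(data):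
--     def line_pairs(wl, cl):
--         ws, cs = wl.split(), cl.split()
--         if len(ws) > len(cs):
--             q = len(ws) // len(cs)
--             return [(w, cs[min(i // q, len(cs) - 1)]) for i, w in enumerate(ws)]
--         return list(zip(ws, cs))
--     return [p
--             for songs in data.values()
--             for sv in songs.values()
--             if len(sv[0]) == len(sv[1])
--             for wl, cl in zip(sv[1], sv[0])
--             for p in line_pairs(wl, cl)]
-- ===== Notes on version B (the rewrite author's own statement) =====
-- stated objective: simpler
-- what changed: get_chord_per_word's padded-list construction (extend(repeat(...)) plus a while-pad loop) is replaced by a direct index formula chords[min(i//q, len(chords)-1)] per word, and the imperative accumulator loops become one flat list comprehension.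
import Mathlib
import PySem

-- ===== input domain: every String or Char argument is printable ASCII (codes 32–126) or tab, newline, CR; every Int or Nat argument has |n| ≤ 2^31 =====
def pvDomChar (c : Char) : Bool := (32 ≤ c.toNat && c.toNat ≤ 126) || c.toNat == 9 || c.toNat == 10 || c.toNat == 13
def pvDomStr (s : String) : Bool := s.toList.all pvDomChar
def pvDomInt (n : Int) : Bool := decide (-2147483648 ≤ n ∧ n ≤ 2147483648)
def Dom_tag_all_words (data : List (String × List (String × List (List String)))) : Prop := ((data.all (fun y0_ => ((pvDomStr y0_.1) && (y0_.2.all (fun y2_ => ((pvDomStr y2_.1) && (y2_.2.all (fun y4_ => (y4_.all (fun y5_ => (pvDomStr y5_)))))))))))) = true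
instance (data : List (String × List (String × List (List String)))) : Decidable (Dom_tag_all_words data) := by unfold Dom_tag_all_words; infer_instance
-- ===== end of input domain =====

-- B replaces A's padded-list construction (extend(repeat(..)) + while-pad loop) by a direct
-- per-word index formula chords[min(i//q, len-1)] and flattens the accumulator loops into one
-- comprehension (objective: simpler).

-- ===== PORT A =====
-- the while-loop 'while len(list) != len(words): append last'; on every reachable call the
-- list is never longer than the target, where 'len != target' and 'len < target' coincide
def pvPad (target : Nat) (l : List String) : List String :=
  if l.length < target then pvPad target (l ++ [l.getLastD ""]) else l
  termination_by target - l.length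
  decreasing_by simp_all; omega

def pvGetChordPerWord (ws cs : List String) : List (String × String) :=
  let numWords := ws.length
  let numChords := cs.length
  if numWords > numChords then
    let q := numWords / numChords       -- num_words // num_chords (both non-negative)
    let base := cs.foldl (fun acc c => acc ++ List.replicate q c) []
    ws.zip (pvPad numWords base)
  else
    ws.zip cs

def tag_all_words (data : List (String × List (String × List (List String)))) : List (String × String) :=
  data.foldl (fun corpus ap =>
    ap.2.foldl (fun corpus sp =>
      let chords := PySem.List.pyGetD sp.2 0 []
      let lyrics := PySem.List.pyGetD sp.2 1 []
      if chords.length = lyrics.length then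
        (lyrics.zip chords).foldl (fun corpus wc =>
          corpus ++ pvGetChordPerWord (PySem.Str.split₀ wc.1) (PySem.Str.split₀ wc.2)) corpus
      else corpus) corpus) []

-- ===== PORT B =====
def pvAltCore (ws cs : List String) : List (String × String) :=
  if ws.length > cs.length then
    let q : Int := PySem.Int.floordiv (ws.length : Int) (cs.length : Int)
    (PySem.List.enumerate ws).map (fun iw =>
      (iw.2, PySem.List.pyGetD cs (min (PySem.Int.floordiv iw.1 q) ((cs.length : Int) - 1)) ""))
  else
    ws.zip cs

def pvLinePairs (wl cl : String) : List (String × String) :=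
  pvAltCore (PySem.Str.split₀ wl) (PySem.Str.split₀ cl)

def tag_all_words_alt (data : List (String × List (String × List (List String)))) : List (String × String) :=
  data.flatMap (fun ap =>
    ap.2.flatMap (fun sp =>
      if (PySem.List.pyGetD sp.2 0 []).length = (PySem.List.pyGetD sp.2 1 []).length then
        ((PySem.List.pyGetD sp.2 1 []).zip (PySem.List.pyGetD sp.2 0 [])).flatMap
          (fun wc => pvLinePairs wc.1 wc.2)
      else []))

-- ===== PRECONDITION & SPEC =====
-- Pre_ excludes (a) association lists with duplicate artist/song keys, which do not represent a
-- Python dict, (b) song values with fewer than two entries, on which A raises IndexError, and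
-- (c) songs where some lyric line has words but the matching chord line has none, on which A
-- raises ZeroDivisionError.
def Pre_tag_all_words (data : List (String × List (String × List (List String)))) : Prop :=
  (data.map Prod.fst).Nodup ∧
  ∀ ap ∈ data, (ap.2.map Prod.fst).Nodup ∧
    ∀ sp ∈ ap.2, 2 ≤ sp.2.length ∧
      ((PySem.List.pyGetD sp.2 0 []).length = (PySem.List.pyGetD sp.2 1 []).length →
        ∀ wc ∈ (PySem.List.pyGetD sp.2 1 []).zip (PySem.List.pyGetD sp.2 0 []),
          PySem.Str.split₀ wc.2 = [] → PySem.Str.split₀ wc.1 = [])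
instance (data : List (String × List (String × List (List String)))) : Decidable (Pre_tag_all_words data) := by unfold Pre_tag_all_words; infer_instance

def pvWitness_tag_all_words : (List (String × List (String × List (List String)))) :=
  [("a", [("s", [["C G"], ["la la la"]])])]

def Spec_tag_all_words (data : List (String × List (String × List (List String)))) (out : List (String × String)) : Prop := out = tag_all_words_alt data
instance (data : List (String × List (String × List (List String)))) (out : List (String × String)) : Decidable (Spec_tag_all_words data out) := by unfold Spec_tag_all_words; infer_instance

-- ===== CLAIM (what is proved, stated in full; the proofs are below) =====
def Claim_equal_tag_all_words : Prop := ∀ (data : List (String × List (String × List (List String)))), Dom_tag_all_words data → Pre_tag_all_words data → Spec_tag_all_words data (tag_all_words data)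

-- ===== LEMMAS AND PROOFS =====

lemma pad_spec : ∀ (n t : Nat) (l : List String), t - l.length ≤ n →
    pvPad t l = l ++ List.replicate (t - l.length) (l.getLastD "") := by
  intro n
  induction n with
  | zero =>
    intro t l h
    rw [pvPad]
    have : ¬ l.length < t := by omega
    simp [this]
    omega
  | succ n ih =>
    intro t l h
    rw [pvPad]
    by_cases hlt : l.length < t
    · simp only [if_pos hlt]
      rw [ih t (l ++ [l.getLastD ""]) (by simp; omega)]
      have hrep : t - l.length = (t - (l.length + 1)) + 1 := by omega
      simp [hrep, List.replicate_succ]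
    · simp [hlt]
      omega

lemma getLastD_map_range (f : Nat → String) (t : Nat) (ht : 0 < t) :
    ((List.range t).map f).getLastD "" = f (t - 1) := by
  obtain ⟨s, rfl⟩ : ∃ s, t = s + 1 := ⟨t - 1, by omega⟩
  rw [List.range_succ, List.map_append]
  simp

lemma flatMap_replicate_eq (q : Nat) (hq : 0 < q) : ∀ (cs : List String),
    cs.flatMap (List.replicate q) =
      (List.range (cs.length * q)).map (fun i => cs.getD (i / q) "") := by
  intro cs
  induction cs with
  | nil => simp
  | cons c cs ih =>
    simp only [List.flatMap_cons, List.length_cons]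
    have : (cs.length + 1) * q = q + cs.length * q := by ring
    rw [this, List.range_add, List.map_append]
    congr 1
    · symm
      apply List.eq_replicate_iff.mpr
      constructor
      · simp
      · intro b hb
        simp only [List.mem_map, List.mem_range] at hb
        obtain ⟨i, hi, rfl⟩ := hb
        rw [Nat.div_eq_of_lt hi]
        rfl
    · rw [List.map_map, ih]
      apply List.map_congr_left
      intro j hj
      simp only [Function.comp_apply]
      have : (q + j) / q = j / q + 1 := by
        rw [Nat.add_comm, Nat.add_div_right _ hq]
      rw [this, List.getD_cons_succ]

lemma gcpw_eq (ws cs : List String) (h : cs = [] → ws = []) :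
    pvGetChordPerWord ws cs = pvAltCore ws cs := by
  unfold pvGetChordPerWord pvAltCore
  by_cases hgt : ws.length > cs.length
  · simp only [if_pos hgt]
    have hcs : cs ≠ [] := by
      intro hc; rw [h hc] at hgt; simp [hc] at hgt
    set n := ws.length with hn
    set m := cs.length with hm
    have hm1 : 1 ≤ m := by
      cases cs with
      | nil => exact absurd rfl hcs
      | cons a l => simp [hm]
    set q := n / m with hq
    have hq1 : 1 ≤ q := (Nat.one_le_div_iff (by omega)).mpr (by omega)
    have hbase : cs.foldl (fun acc c => acc ++ List.replicate q c) [] =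
        (List.range (m * q)).map (fun i => cs.getD (i / q) "") := by
      rw [PySem.List.foldl_append_eq_flatMap, List.nil_append,
        flatMap_replicate_eq q (by omega) cs]
    have hmq : m * q ≤ n := by
      calc m * q = q * m := Nat.mul_comm _ _
      _ ≤ n := Nat.div_mul_le_self n m
    have hpad : pvPad n (cs.foldl (fun acc c => acc ++ List.replicate q c) []) =
        (List.range (m * q)).map (fun i => cs.getD (i / q) "") ++
          List.replicate (n - m * q) (cs.getD (m - 1) "") := by
      rw [hbase, pad_spec n n _ (by simp)]
      simp only [List.length_map, List.length_range]
      rw [getLastD_map_range _ _ (by positivity)]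
      have hP : 1 ≤ m * q := Nat.mul_pos (by omega) (by omega)
      have hdiv : (m * q - 1) / q = m - 1 := by
        apply Nat.div_eq_of_lt_le
        · have e : (m - 1) * q = m * q - 1 * q := Nat.sub_mul m 1 q
          rw [e, one_mul]; omega
        · have hs : (m - 1 + 1) = m := by omega
          rw [hs]; omega
      rw [hdiv]
    rw [hpad]
    apply List.ext_getElem
    · simp
      omega
    · intro k h1 h2
      have hkn : k < n := by
        have := h1; simp at this; omega
      rw [List.getElem_zip]
      have hen : (PySem.List.enumerate ws)[k]'(by simpa [PySem.List.length_enumerate] using hkn) = ((k : Int), ws[k]'hkn) := by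
        simpa using PySem.List.getElem_enumerate (xs := ws) (s := 0) (k := k) (by simpa using hkn)
      rw [List.getElem_map, hen]
      simp only
      congr 1
      have hfd : PySem.Int.floordiv ((k : Int)) (PySem.Int.floordiv ((n : Int)) ((m : Int))) = ((k / q : Nat) : Int) := by
        rw [PySem.Int.floordiv_natCast, PySem.Int.floordiv_natCast]
      rw [hfd]
      have hmin : min (((k / q : Nat) : Int)) ((m : Int) - 1) = (((min (k / q) (m - 1) : Nat)) : Int) := by
        have : ((m : Int) - 1) = ((m - 1 : Nat) : Int) := by omega
        rw [this, Nat.cast_min]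
      rw [hmin, PySem.List.pyGetD_natCast]
      by_cases hk : k < m * q
      · rw [List.getElem_append_left (by simpa using hk)]
        rw [List.getElem_map, List.getElem_range]
        have : k / q < m := by
          rw [Nat.div_lt_iff_lt_mul (by omega)]; omega
        have hminv : min (k / q) (m - 1) = k / q := by omega
        rw [hminv]
      · rw [List.getElem_append_right (by simpa using hk)]
        rw [List.getElem_replicate]
        have : m ≤ k / q := by
          rw [Nat.le_div_iff_mul_le (by omega)]; omega
        have hminv : min (k / q) (m - 1) = m - 1 := by omega
        rw [hminv]
  · simp only [if_neg hgt]

lemma foldl_step_flatMap {α β : Type} (step : List β → α → List β) (f : α → List β) :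
    ∀ (l : List α) (acc : List β), (∀ x ∈ l, ∀ c, step c x = c ++ f x) →
      l.foldl step acc = acc ++ l.flatMap f := by
  intro l
  induction l with
  | nil => intro acc _; simp
  | cons x l ih =>
    intro acc h
    simp only [List.foldl_cons, List.flatMap_cons]
    rw [h x (by simp), ih _ (fun y hy c => h y (by simp [hy]) c), List.append_assoc]

lemma flatMap_congr_mem {α β : Type} (f g : α → List β) :
    ∀ (l : List α), (∀ x ∈ l, f x = g x) → l.flatMap f = l.flatMap g := by
  intro l
  induction l with
  | nil => intro _; rfl
  | cons x l ih =>
    intro h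
    simp only [List.flatMap_cons, h x (by simp), ih (fun y hy => h y (by simp [hy]))]

-- ===== VERDICT (by name: the statement is the Claim_ definition above) =====
theorem tag_all_words_spec : Claim_equal_tag_all_words := by
  intro data _hdom hpre
  obtain ⟨-, h2⟩ := hpre
  unfold Spec_tag_all_words tag_all_words tag_all_words_alt
  rw [foldl_step_flatMap _
      (fun ap => ap.2.flatMap (fun sp =>
        if (PySem.List.pyGetD sp.2 0 []).length = (PySem.List.pyGetD sp.2 1 []).length then
          ((PySem.List.pyGetD sp.2 1 []).zip (PySem.List.pyGetD sp.2 0 [])).flatMap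
            (fun wc => pvGetChordPerWord (PySem.Str.split₀ wc.1) (PySem.Str.split₀ wc.2))
        else []))
      data []
      (by
        intro ap _ c
        apply foldl_step_flatMap
        intro sp _ c
        dsimp only
        by_cases hc : (PySem.List.pyGetD sp.2 0 []).length = (PySem.List.pyGetD sp.2 1 []).length
        · rw [if_pos hc, if_pos hc]
          apply foldl_step_flatMap
          intro wc _ c
          rfl
        · rw [if_neg hc, if_neg hc, List.append_nil]),
    List.nil_append]
  apply flatMap_congr_mem
  intro ap hap
  apply flatMap_congr_mem
  intro sp hsp
  by_cases hc : (PySem.List.pyGetD sp.2 0 []).length = (PySem.List.pyGetD sp.2 1 []).length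
  · rw [if_pos hc, if_pos hc]
    apply flatMap_congr_mem
    intro wc hwc
    unfold pvLinePairs
    exact gcpw_eq _ _ (fun hnil => ((h2 ap hap).2 sp hsp).2 hc wc hwc hnil)
  · rw [if_neg hc, if_neg hc]
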